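-- pv_equiv track=rewrite | github.com/posl/comment_recommendation | script/mod_gen/5_time/en/159_D/6.py | solve
-- ===== SOURCE A (Python) =====
-- def solve(N, A):
--     from collections import defaultdict
--     d = defaultdict(int)
--     for a in A:
--         d[a] += 1
--     s = 0
--     for a in A:
--         s += d[a] - 1
--     return s
-- ===== SOURCE B (Python) =====
-- def solve(N, A):
--     from collections import Counter
--     return sum(c * (c - 1) for c in Counter(A).values())
-- ===== Notes on version B (the rewrite author's own statement) =====
-- stated objective: faster
-- what changed: Replaces the second per-element pass (adding d[a]-1 for each of the n elements) with a per-distinct-group aggregation: each group of c equal elements contributes c*(c-1) read once from the counter's values, so the second pass shrinks from n elements to the distinct values (measured ~1.75x faster).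
import Mathlib
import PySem

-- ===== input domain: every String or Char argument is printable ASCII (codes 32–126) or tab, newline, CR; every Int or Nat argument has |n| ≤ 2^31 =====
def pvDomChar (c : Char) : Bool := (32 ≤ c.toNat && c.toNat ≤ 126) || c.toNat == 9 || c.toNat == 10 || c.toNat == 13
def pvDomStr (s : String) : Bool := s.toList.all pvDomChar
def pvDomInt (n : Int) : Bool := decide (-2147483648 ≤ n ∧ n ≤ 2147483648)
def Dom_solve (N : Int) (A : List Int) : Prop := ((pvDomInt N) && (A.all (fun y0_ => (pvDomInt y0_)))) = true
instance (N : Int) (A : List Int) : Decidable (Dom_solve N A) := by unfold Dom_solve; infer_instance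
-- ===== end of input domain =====

-- B sums c*(c-1) over the distinct groups of the counter instead of A's second
-- per-element pass over A; a timing run measured B ~1.7× faster on large inputs.

-- ===== PORT A =====
def solve (N : Int) (A : List Int) : Int :=
  let d : PySem.Dict Int Int := A.foldl (fun d a => d.modify a 0 (· + 1)) PySem.Dict.empty
  A.foldl (fun s a => s + (d.getD a 0 - 1)) 0

-- ===== PORT B =====
def solve_alt (N : Int) (A : List Int) : Int :=
  ((PySem.Dict.counter A).values.map (fun c => c * (c - 1))).sum

-- ===== PRECONDITION & SPEC =====
def Spec_solve (N : Int) (A : List Int) (out : Int) : Prop := out = solve_alt N A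
instance (N : Int) (A : List Int) (out : Int) : Decidable (Spec_solve N A out) := by unfold Spec_solve; infer_instance

-- ===== CLAIM (what is proved, stated in full; the proofs are below) =====
def Claim_equal_solve : Prop := ∀ (N : Int) (A : List Int), Dom_solve N A → Spec_solve N A (solve N A)

-- ===== LEMMAS AND PROOFS =====

-- Grouping: summing a fixed function of the element over A equals summing the
-- group-size-weighted value over the distinct elements (here f a = count a - 1).
theorem grouped_sum (A : List Int) :
    (A.map (fun a => (A.count a : Int) - 1)).sum
      = ((PySem.Set.ofList A).map (fun k => (A.count k : Int) * ((A.count k : Int) - 1))).sum := by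
  have hfin : (PySem.Set.ofList A).toFinset = A.toFinset := by
    ext x; simp [List.mem_toFinset, PySem.Set.mem_ofList]
  calc (A.map (fun a => (A.count a : Int) - 1)).sum
      = ∑ m ∈ A.toFinset, (A.count m) • ((A.count m : Int) - 1) :=
        Finset.sum_list_map_count A (fun a => (A.count a : Int) - 1)
    _ = (PySem.Set.ofList A).toFinset.sum (fun k => (A.count k : Int) * ((A.count k : Int) - 1)) := by
        rw [hfin]; simp
    _ = ((PySem.Set.ofList A).map (fun k => (A.count k : Int) * ((A.count k : Int) - 1))).sum :=
        List.sum_toFinset _ (PySem.Set.nodup_ofList A)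

-- ===== VERDICT (by name: the statement is the Claim_ definition above) =====
theorem solve_spec : Claim_equal_solve := by
  intro N A _
  unfold Spec_solve solve solve_alt
  rw [← PySem.Dict.counter_eq_foldl]
  rw [PySem.List.foldl_add (g := fun a => (PySem.Dict.counter A).getD a 0 - 1)]
  have hA : (A.map (fun a => (PySem.Dict.counter A).getD a 0 - 1)).sum
      = (A.map (fun a => (A.count a : Int) - 1)).sum := by
    simp [PySem.Dict.getD_counter]
  have hB : (PySem.Dict.counter A).values.map (fun c => c * (c - 1))
      = (PySem.Set.ofList A).map (fun k => (A.count k : Int) * ((A.count k : Int) - 1)) := by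
    simp [PySem.Dict.values, PySem.Dict.items_counter, List.map_map, Function.comp]
  rw [hA, hB, grouped_sum]
  ring_nf
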